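-- pv_equiv track=rewrite | github.com/mahyarmohammadimatin/JSON_curses_turtle_clientServer_Compiler | JSON beautifier with curses/phaze2.py | gonear
-- ===== SOURCE A (Python) =====
-- def gonear(line,data):
--     j,i=0,1
--     while i!=line:
--         j+=1
--         if data[j]=="/":
--             i+=1
--     j+=1
--     p=0
--     while data[j+p]==" ":
--         p+=1
--     return (p,p+j)
-- ===== SOURCE B (Python) =====
-- def gonear(line, data):
--     if line == 1:
--         j = 1
--     else:
--         slashes = [k for k, c in enumerate(data[1:], 1) if c == "/"]
--         j = slashes[line - 2] + 1
--     tail = data[j:]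
--     p = len(tail) - len(tail.lstrip(" "))
--     return (p, p + j)
-- ===== Notes on version B (the rewrite author's own statement) =====
-- stated objective: idiomatic
-- what changed: A's counting while-loop over characters and its manual space-counting loop are replaced by a comprehension collecting slash positions in data[1:], direct indexing slashes[line-2] for the content start, and lstrip(' ') arithmetic for the indentation.
import Mathlib
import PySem

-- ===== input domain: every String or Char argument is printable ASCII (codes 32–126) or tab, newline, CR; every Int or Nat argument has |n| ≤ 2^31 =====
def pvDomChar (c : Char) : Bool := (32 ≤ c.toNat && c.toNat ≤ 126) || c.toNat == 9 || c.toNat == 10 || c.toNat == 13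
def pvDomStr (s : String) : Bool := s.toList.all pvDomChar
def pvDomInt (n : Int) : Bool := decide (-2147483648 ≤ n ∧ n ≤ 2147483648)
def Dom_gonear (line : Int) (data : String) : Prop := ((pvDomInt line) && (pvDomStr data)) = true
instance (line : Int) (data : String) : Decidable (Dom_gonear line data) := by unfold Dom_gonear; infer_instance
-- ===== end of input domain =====

-- B replaces A's counting while-loops by a positions comprehension + arithmetic + lstrip (idiomatic decomposition, same cost).

-- ===== PORT A =====
-- A's first while loop: reads data[j] for j = 1,2,…, bumping i at each '/', until i == line;
-- the scanned suffix data[1:] is carried as a list, j and i as in the Python.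
def goScan (rest : List Char) (j i line : Int) : Int :=
  if i = line then j
  else match rest with
    | [] => j            -- Python raises IndexError here (excluded by Pre_); value is junk
    | c :: rs => goScan rs (j + 1) (if c = '/' then i + 1 else i) line

-- A's second while loop: p counts leading spaces of data[j:]; on an all-space tail Python raises (excluded by Pre_).
def countSp : List Char → Int
  | [] => 0
  | c :: rs => if c = ' ' then 1 + countSp rs else 0

def gonear (line : Int) (data : String) : Int × Int :=
  let j := goScan data.toList.tail 0 1 line
  let j := j + 1
  let p := countSp (data.toList.drop j.toNat)
  (p, p + j)

-- ===== PORT B =====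
-- transcription of B's comprehension "[k for k, c in enumerate(data[1:], 1) if c == '/']"
def slashesFrom : List Char → Int → List Int
  | [], _ => []
  | c :: rs, k => if c = '/' then k :: slashesFrom rs (k + 1) else slashesFrom rs (k + 1)

def gonear_alt (line : Int) (data : String) : Int × Int :=
  let cs := data.toList
  let j : Int :=
    if line = 1 then 1
    else ((PySem.List.pyGet? (slashesFrom (PySem.List.slice cs (some 1) none) 1) (line - 2)).getD 0) + 1
      -- slashes[line-2]: pyGet? is Python indexing; .getD 0 is junk on the IndexError region (outside Pre_)
  let tail := PySem.List.slice cs (some j) none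
  let stripped := tail.dropWhile (fun c => c == ' ')  -- hand port of tail.lstrip(" "): drops leading ' ' only (exact)
  let p : Int := (tail.length : Int) - (stripped.length : Int)
  (p, p + j)

-- ===== PRECONDITION & SPEC =====
-- Pre_ is exactly where the Python A returns: it excludes only inputs on which A raises IndexError
-- (line < 1, fewer than line-1 slashes in data[1:], or an all-space tail after the content start).
-- Closed form: for line ≥ 2, s is the index of the (line-1)th '/' among indices ≥ 1 (exactly line-2
-- slashes strictly between index 0 and s), and some character after s is not a space.
def Pre_gonear (line : Int) (data : String) : Prop :=
  1 ≤ line ∧ line - 1 ≤ (data.toList.tail.count '/' : Int) ∧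
  (if line = 1 then ((data.toList.drop 1).any (fun c => c != ' ')) = true
   else ∃ s < data.toList.length, 1 ≤ s ∧ data.toList.getD s ' ' = '/' ∧
          (data.toList.take s).tail.count '/' = (line - 2).toNat ∧
          ((data.toList.drop (s + 1)).any (fun c => c != ' ')) = true)
instance (line : Int) (data : String) : Decidable (Pre_gonear line data) := by
  unfold Pre_gonear; infer_instance

def pvWitness_gonear : Int × String := (2, "/a/ b")

def Spec_gonear (line : Int) (data : String) (out : Int × Int) : Prop := out = gonear_alt line data
instance (line : Int) (data : String) (out : Int × Int) : Decidable (Spec_gonear line data out) := by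
  unfold Spec_gonear; infer_instance

-- ===== CLAIM (what is proved, stated in full; the proofs are below) =====
def Claim_equal_gonear : Prop := ∀ (line : Int) (data : String),
  Dom_gonear line data → Pre_gonear line data → Spec_gonear line data (gonear line data)

-- ===== LEMMAS AND PROOFS =====

lemma slashesFrom_length (cs : List Char) (k : Int) :
    (slashesFrom cs k).length = cs.count '/' := by
  induction cs generalizing k with
  | nil => simp [slashesFrom]
  | cons c rs ih =>
    by_cases h : c = '/' <;> simp [slashesFrom, h, ih]

lemma slashesFrom_mem_le (cs : List Char) (k x : Int) (hx : x ∈ slashesFrom cs k) : k ≤ x := by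
  induction cs generalizing k with
  | nil => simp [slashesFrom] at hx
  | cons c rs ih =>
    by_cases h : c = '/'
    · simp [slashesFrom, h] at hx
      rcases hx with rfl | hx
      · exact le_refl _
      · have := ih (k + 1) hx; omega
    · simp [slashesFrom, h] at hx
      have := ih (k + 1) hx; omega

lemma goScan_eq (cs : List Char) (j i : Int) (n : Nat) (h1 : 1 ≤ n) (h2 : n ≤ cs.count '/') :
    goScan cs j i (i + n) = (slashesFrom cs (j + 1)).getD (n - 1) 0 := by
  induction cs generalizing j i n with
  | nil => simp at h2; omega
  | cons c rs ih =>
    have hne : i ≠ i + (n : Int) := by omega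
    rw [goScan.eq_def]
    simp only [if_neg hne]
    by_cases h : c = '/'
    · by_cases hn : n = 1
      · subst hn
        rw [if_pos h, goScan.eq_def, if_pos (by push_cast; ring)]
        simp [slashesFrom, h]
      · have h2' : n - 1 ≤ rs.count '/' := by
          simp [h] at h2; omega
        have hcast : i + (n : Int) = (i + 1) + ((n - 1 : Nat) : Int) := by omega
        rw [if_pos h, hcast, ih (j + 1) (i + 1) (n - 1) (by omega) h2']
        have hsf : slashesFrom (c :: rs) (j + 1) = (j + 1) :: slashesFrom rs (j + 1 + 1) := by
          simp [slashesFrom, h]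
        rw [hsf]
        obtain ⟨m, hm⟩ : ∃ m, n - 1 = m + 1 := ⟨n - 2, by omega⟩
        rw [hm, List.getD_cons_succ]
        norm_num
    · have h2' : n ≤ rs.count '/' := by simpa [h] using h2
      rw [if_neg h, ih (j + 1) i n h1 h2']
      simp [slashesFrom, h]

lemma countSp_eq (xs : List Char) :
    countSp xs = ((xs.takeWhile (fun c => c == ' ')).length : Int) := by
  induction xs with
  | nil => simp [countSp]
  | cons c rs ih =>
    by_cases h : c = ' ' <;> (simp [countSp, h, ih]; try omega)

lemma countSp_eq_sub (xs : List Char) :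
    countSp xs = (xs.length : Int) - ((xs.dropWhile (fun c => c == ' ')).length : Int) := by
  have h := congrArg List.length (List.takeWhile_append_dropWhile (p := fun c => c == ' ') (l := xs))
  rw [List.length_append] at h
  rw [countSp_eq]
  omega

-- ===== VERDICT (by name: the statement is the Claim_ definition above) =====
theorem gonear_spec : Claim_equal_gonear := by
  intro line data _ hpre
  obtain ⟨h1, h2, _⟩ := hpre
  simp only [Spec_gonear, gonear, gonear_alt]
  by_cases hl : line = 1
  · subst hl
    have hA : goScan data.toList.tail 0 1 1 = 0 := by rw [goScan.eq_def]; simp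
    rw [hA, if_pos rfl, PySem.List.slice_from_one, countSp_eq_sub]
    norm_num [List.drop_one]
  · -- line ≥ 2
    set cs := data.toList with hcs
    have hn : line = 1 + ((line - 1).toNat : Int) := by omega
    set n : Nat := (line - 1).toNat with hndef
    have hn1 : 1 ≤ n := by omega
    have hcount : n ≤ cs.tail.count '/' := by omega
    have hscan : goScan cs.tail 0 1 line = (slashesFrom cs.tail (0 + 1)).getD (n - 1) 0 := by
      rw [hn]; exact goScan_eq cs.tail 0 1 n hn1 hcount
    set l := slashesFrom cs.tail 1 with hl'
    have hlen : n ≤ l.length := by rw [hl', slashesFrom_length]; exact hcount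
    have hidx : n - 1 < l.length := by omega
    have hget : PySem.List.pyGet? l (line - 2) = some (l.getD (n - 1) 0) := by
      have : line - 2 = ((n - 1 : Nat) : Int) := by omega
      rw [this, PySem.List.pyGet?_natCast, List.getElem?_eq_getElem hidx, List.getD_eq_getElem l 0 hidx]
    have hmem : l.getD (n - 1) 0 ∈ l := by
      rw [List.getD_eq_getElem l 0 hidx]; exact List.getElem_mem hidx
    have hpos : 1 ≤ l.getD (n - 1) 0 := slashesFrom_mem_le cs.tail 1 _ hmem
    rw [if_neg hl, PySem.List.slice_from_one, ← hl', hget]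
    simp only [Option.getD_some]
    rw [hscan]
    simp only [zero_add, ← hl']
    set e := l.getD (n - 1) 0 with he
    have hslice : PySem.List.slice cs (some (e + 1)) none = cs.drop (e + 1).toNat :=
      PySem.List.slice_from cs (show (0:Int) ≤ e + 1 by omega)
    rw [hslice, countSp_eq_sub]
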